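-- pv_equiv track=rewrite | github.com/kpark1/Research2019 | sphinx/GbtPacketChecker.py | track_pl_hit
-- ===== SOURCE A (Python) =====
-- from collections import Counter
--
-- def track_pl_hit(input_pl_ls):                          # returns a dictionary of planes that have more than one hits
--     pl_ls = [int(pl) for pl in input_pl_ls]
--     count = Counter(pl_ls)
--     multiple_hit_pl = {}
--     for pl in list(set(pl_ls)):
--         if count[pl] > 1:
--             multiple_hit_pl[pl] = count[pl]
--     return multiple_hit_pl                  # {pl: count, ...}
-- ===== SOURCE B (Python) =====
-- def track_pl_hit(input_pl_ls):      # returns a dictionary of planes that have more than one hit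
--     vals = [int(pl) for pl in input_pl_ls]
--     # sort, then count each run of consecutive equal values in one grouped pass
--     counts = {}
--     run_v, run_n = None, 0
--     for v in sorted(vals):
--         if v == run_v:
--             run_n += 1
--         else:
--             if run_n:
--                 counts[run_v] = run_n
--             run_v, run_n = v, 1
--     if run_n:
--         counts[run_v] = run_n
--     # emit the multi-hit planes, keyed in first-occurrence order
--     return {v: counts[v] for v in dict.fromkeys(vals) if counts[v] > 1}
-- ===== Notes on version B (the rewrite author's own statement) =====
-- stated objective: alternative
-- what changed: Replaces A's Counter hash-counting plus set iteration by sorting the values and counting each run of consecutive equal values in one grouped pass, then emitting the multi-hit planes over dict.fromkeys in first-occurrence order.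
import Mathlib
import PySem

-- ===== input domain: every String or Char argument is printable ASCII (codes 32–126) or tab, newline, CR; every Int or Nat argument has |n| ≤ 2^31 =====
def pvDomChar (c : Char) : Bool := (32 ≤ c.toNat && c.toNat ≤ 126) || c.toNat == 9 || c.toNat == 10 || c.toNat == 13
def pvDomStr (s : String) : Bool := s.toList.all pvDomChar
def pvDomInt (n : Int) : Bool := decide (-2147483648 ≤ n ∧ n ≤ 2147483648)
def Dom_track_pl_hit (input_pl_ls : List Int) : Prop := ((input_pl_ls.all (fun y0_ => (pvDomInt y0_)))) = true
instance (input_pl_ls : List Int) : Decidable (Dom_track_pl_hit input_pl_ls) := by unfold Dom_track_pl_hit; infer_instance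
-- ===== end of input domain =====

-- B replaces A's Counter + set iteration by sort-then-group run-length counting,
-- emitting the multi-hit planes over dict.fromkeys in first-occurrence order.


-- ===== PORT A =====
-- Python set iteration order is hash order; the result is a dict (compared as a dict,
-- ignoring order), so iterating PySem.Set.ofList here is exact as a dict value.
def track_pl_hit (input_pl_ls : List Int) : List (Int × Int) :=
  let pl_ls := input_pl_ls.map (fun pl => pl)      -- int(pl) is the identity on ints
  let count : PySem.Dict Int Int := PySem.Dict.counter pl_ls
  let multiple_hit_pl : PySem.Dict Int Int :=
    (PySem.Set.ofList pl_ls).foldl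
      (fun d pl => if count.getD pl 0 > 1 then d.insert pl (count.getD pl 0) else d)
      PySem.Dict.empty
  multiple_hit_pl.items

-- ===== PORT B =====
-- loop body of B's grouped pass: state = (counts, run_v, run_n)
def pvStepB (st : PySem.Dict Int Int × Option Int × Int) (v : Int) :
    PySem.Dict Int Int × Option Int × Int :=
  if some v == st.2.1 then (st.1, st.2.1, st.2.2 + 1)
  else ((if st.2.2 ≠ 0 then st.1.insert (st.2.1.getD 0) st.2.2 else st.1), some v, 1)

-- the trailing 'if run_n: counts[run_v] = run_n' (run_v is only read when run_n ≠ 0)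
def pvFinB (st : PySem.Dict Int Int × Option Int × Int) : PySem.Dict Int Int :=
  if st.2.2 ≠ 0 then st.1.insert (st.2.1.getD 0) st.2.2 else st.1

def track_pl_hit_alt (input_pl_ls : List Int) : List (Int × Int) :=
  let vals := input_pl_ls.map (fun pl => pl)       -- int(pl) is the identity on ints
  let counts := pvFinB ((PySem.List.sorted vals (fun v => v) false).foldl pvStepB
                          (PySem.Dict.empty, none, 0))
  -- {v: counts[v] for v in dict.fromkeys(vals) if counts[v] > 1}
  -- counts[v] cannot raise (every v in vals heads a run), so getD is exact here
  ((PySem.List.dedup vals).foldl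
      (fun d v => if counts.getD v 0 > 1 then d.insert v (counts.getD v 0) else d)
      PySem.Dict.empty).items

-- ===== PRECONDITION & SPEC =====
def Spec_track_pl_hit (input_pl_ls : List Int) (out : List (Int × Int)) : Prop := out = track_pl_hit_alt input_pl_ls
instance (input_pl_ls : List Int) (out : List (Int × Int)) : Decidable (Spec_track_pl_hit input_pl_ls out) := by unfold Spec_track_pl_hit; infer_instance

-- ===== CLAIM (what is proved, stated in full; the proofs are below) =====
def Claim_equal_track_pl_hit : Prop := ∀ (input_pl_ls : List Int), Dom_track_pl_hit input_pl_ls → Spec_track_pl_hit input_pl_ls (track_pl_hit input_pl_ls)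

-- ===== LEMMAS AND PROOFS =====

-- invariant of the grouped pass: resuming inside a run of rv with rn hits so far
theorem pvRun (r : List Int) (d : PySem.Dict Int Int) (rv rn : Int)
    (hs : r.Pairwise (· ≤ ·)) (hb : ∀ y ∈ r, rv ≤ y) (hn : 0 < rn) (v : Int) :
    (pvFinB (r.foldl pvStepB (d, some rv, rn))).getD v 0 =
      if v = rv then rn + (r.count v : Int)
      else if v ∈ r then (r.count v : Int) else d.getD v 0 := by
  induction r generalizing d rv rn with
  | nil =>
      have hfin : pvFinB (d, some rv, rn) = d.insert rv rn := by
        simp [pvFinB, show rn ≠ 0 by omega]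
      simp only [List.foldl_nil, hfin, PySem.Dict.getD_insert, List.count_nil,
        List.not_mem_nil, if_false]
      split_ifs <;> simp
  | cons x r ih =>
      by_cases hx : x = rv
      · subst hx
        have h1 : pvStepB (d, some x, rn) x = (d, some x, rn + 1) := by
          simp [pvStepB]
        rw [List.foldl_cons, h1, ih d x (rn + 1) hs.of_cons
            (fun y hy => (List.pairwise_cons.1 hs).1 y hy) (by omega)]
        by_cases hvx : v = x
        · subst hvx
          simp only [List.count_cons_self]
          push_cast; ring
        · have hxv : ¬ x = v := fun e => hvx e.symm
          simp [hvx, hxv, List.mem_cons]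
      · have hrn : rn ≠ 0 := by omega
        have h1 : pvStepB (d, some rv, rn) x = (d.insert rv rn, some x, 1) := by
          simp [pvStepB, hx, hrn]
        have hlt : ∀ y ∈ x :: r, rv < y := by
          intro y hy
          have hxrv : rv < x :=
            lt_of_le_of_ne (hb _ (List.mem_cons_self)) (fun e => hx e.symm)
          rcases List.mem_cons.1 hy with h | h
          · subst h; exact hxrv
          · exact lt_of_lt_of_le hxrv ((List.pairwise_cons.1 hs).1 y h)
        have hrvnot : rv ∉ x :: r := fun hmem => lt_irrefl rv (hlt rv hmem)
        rw [List.foldl_cons, h1, ih (d.insert rv rn) x 1 hs.of_cons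
            (fun y hy => (List.pairwise_cons.1 hs).1 y hy) (by omega)]
        have hcnt0 : List.count rv (x :: r) = 0 := List.count_eq_zero.2 hrvnot
        by_cases hvrv : v = rv
        · subst hvrv
          have hvx : v ≠ x := fun e => hx e.symm
          have hvr : v ∉ r := fun h => hrvnot (List.mem_cons_of_mem _ h)
          simp [hvx, hvr, hcnt0]
        · by_cases hvx : v = x
          · subst hvx
            simp only [if_neg hvrv, List.count_cons_self,
              List.mem_cons, true_or, if_pos]
            push_cast; ring
          · have hxv : ¬ x = v := fun e => hvx e.symm
            simp [hvrv, hvx, hxv, List.mem_cons, PySem.Dict.getD_insert]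

-- on a sorted list the grouped pass produces exactly the multiplicity of every value
theorem pvCounts (s : List Int) (hs : s.Pairwise (· ≤ ·)) (v : Int) :
    (pvFinB (s.foldl pvStepB (PySem.Dict.empty, none, 0))).getD v 0
      = (s.count v : Int) := by
  cases s with
  | nil => simp [pvFinB, PySem.Dict.getD]
  | cons x s =>
      have h1 : pvStepB (PySem.Dict.empty, none, 0) x
          = (PySem.Dict.empty, some x, 1) := by simp [pvStepB]
      rw [List.foldl_cons, h1, pvRun s PySem.Dict.empty x 1 hs.of_cons
          (fun y hy => (List.pairwise_cons.1 hs).1 y hy) (by omega)]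
      by_cases hvx : v = x
      · subst hvx
        simp only [List.count_cons_self]
        push_cast; ring
      · have hxv : ¬ x = v := fun e => hvx e.symm
        simp only [if_neg hvx, List.count_cons, beq_iff_eq, if_neg hxv, Nat.add_zero]
        split_ifs with hvr
        · rfl
        · rw [List.count_eq_zero.2 hvr]
          simp [PySem.Dict.getD]

-- ===== VERDICT (by name: the statement is the Claim_ definition above) =====
theorem track_pl_hit_spec : Claim_equal_track_pl_hit := by
  intro xs _
  unfold Spec_track_pl_hit track_pl_hit track_pl_hit_alt
  simp only [List.map_id', PySem.List.dedup_eq_ofList]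
  congr 1
  apply PySem.List.foldl_congr_mem
  intro acc v _
  have hc : (pvFinB ((PySem.List.sorted xs (fun v => v) false).foldl pvStepB
        (PySem.Dict.empty, none, 0))).getD v 0 = (xs.count v : Int) := by
    rw [pvCounts _ (PySem.List.sorted_pairwise xs (fun v => v)) v,
        (PySem.List.sorted_perm xs (fun v => v) false).count_eq]
  rw [hc, PySem.Dict.getD_counter]
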